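-- pv_equiv track=rewrite | github.com/tumaitelaura/Bioinformatika | main.py | lookForStopToStart
-- ===== SOURCE A (Python) =====
-- start_codons = ['ATG']
--
-- stop_codons = ['TAG', 'TAA', 'TGA']
--
-- def lookForStopToStart(frame, stride, i, length):
--     found = False
--     x = ""
--     for j in range(len(frame[stride:])):
--         if frame[j + stride: j + stride + 3] in start_codons:
--             x = frame[i: j + stride + 3]
--             length += 3
--             found = True
--             j += 3
--         elif frame[j + stride: j + stride + 3] in stop_codons:
--             break
--         length += 1
--     return found, x
-- ===== SOURCE B (Python) =====
-- start_codons = ['ATG']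
--
-- stop_codons = ['TAG', 'TAA', 'TGA']
--
-- def lookForStopToStart(frame, stride, i, length):
--     n = len(frame[stride:])
--     ps = n
--     for j in range(n):
--         if frame[j + stride: j + stride + 3] in stop_codons:
--             ps = j
--             break
--     for j in range(ps - 1, -1, -1):
--         if frame[j + stride: j + stride + 3] in start_codons:
--             return True, frame[i: j + stride + 3]
--     return False, ""
-- ===== Notes on version B (the rewrite author's own statement) =====
-- stated objective: alternative
-- what changed: A's single stateful loop (accumulating found/x with a break at the first stop codon, plus dead length/j+=3 bookkeeping) is replaced by two phases: first find the position of the first stop codon after stride, then scan the region before it backwards and return at the first start codon seen, which is A's last one; the dead length arithmetic is dropped.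
import Mathlib
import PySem

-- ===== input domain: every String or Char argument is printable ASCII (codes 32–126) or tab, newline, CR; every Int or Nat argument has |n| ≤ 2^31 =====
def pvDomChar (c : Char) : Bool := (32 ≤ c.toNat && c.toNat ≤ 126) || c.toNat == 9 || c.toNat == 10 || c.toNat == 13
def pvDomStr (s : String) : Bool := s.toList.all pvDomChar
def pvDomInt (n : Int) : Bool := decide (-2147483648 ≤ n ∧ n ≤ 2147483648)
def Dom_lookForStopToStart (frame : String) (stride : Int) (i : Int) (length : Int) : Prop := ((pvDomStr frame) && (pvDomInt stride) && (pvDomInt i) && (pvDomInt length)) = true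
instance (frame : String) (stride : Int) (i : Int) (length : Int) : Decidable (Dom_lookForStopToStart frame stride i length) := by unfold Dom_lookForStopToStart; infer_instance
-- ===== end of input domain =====

-- B replaces A's single stateful break-loop by two phases: find the first stop position, then
-- scan the region before it BACKWARDS and return at the first (= last) start codon (objective: alternative decomposition).

-- shared module constants and the codon window frame[j+stride : j+stride+3]
def startCodons : List String := ["ATG"]
def stopCodons : List String := ["TAG", "TAA", "TGA"]
def codonAt (frame : String) (stride j : Int) : String :=
  PySem.Str.slice frame (some (j + stride)) (some (j + stride + 3))

-- ===== PORT A =====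
-- A's for-loop over range(len(frame[stride:])) with state (found, x, length) and break at a stop codon
def aLoop (frame : String) (stride i : Int) : List Int → (Bool × String × Int) → (Bool × String × Int)
  | [], st => st
  | j :: js, (found, x, length) =>
    if codonAt frame stride j ∈ startCodons then
      aLoop frame stride i js (true, PySem.Str.slice frame (some i) (some (j + stride + 3)), length + 3 + 1)
    else if codonAt frame stride j ∈ stopCodons then (found, x, length)
    else aLoop frame stride i js (found, x, length + 1)

def lookForStopToStart (frame : String) (stride : Int) (i : Int) (length : Int) : Bool × String :=
  let n := PySem.Str.len (PySem.Str.slice frame (some stride) none)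
  let st := aLoop frame stride i (PySem.List.pyRange 0 n 1) (false, "", length)
  (st.1, st.2.1)

-- ===== PORT B =====
-- phase 1: ps = first j in range(n) whose window is a stop codon, else n
def bFindStop (frame : String) (stride : Int) : List Int → Int → Int
  | [], ps => ps
  | j :: js, ps => if codonAt frame stride j ∈ stopCodons then j else bFindStop frame stride js ps

-- phase 2: scan range(ps-1, -1, -1) and return at the first start codon
def bFindStart (frame : String) (stride i : Int) : List Int → Bool × String
  | [] => (false, "")
  | j :: js =>
    if codonAt frame stride j ∈ startCodons then
      (true, PySem.Str.slice frame (some i) (some (j + stride + 3)))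
    else bFindStart frame stride i js

def lookForStopToStart_alt (frame : String) (stride : Int) (i : Int) (length : Int) : Bool × String :=
  let n := PySem.Str.len (PySem.Str.slice frame (some stride) none)
  let ps := bFindStop frame stride (PySem.List.pyRange 0 n 1) n
  bFindStart frame stride i (PySem.List.pyRange (ps - 1) (-1) (-1))

-- ===== PRECONDITION & SPEC =====
def Spec_lookForStopToStart (frame : String) (stride : Int) (i : Int) (length : Int) (out : Bool × String) : Prop := out = lookForStopToStart_alt frame stride i length
instance (frame : String) (stride : Int) (i : Int) (length : Int) (out : Bool × String) : Decidable (Spec_lookForStopToStart frame stride i length out) := by unfold Spec_lookForStopToStart; infer_instance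

-- ===== CLAIM (what is proved, stated in full; the proofs are below) =====
def Claim_equal_lookForStopToStart : Prop := ∀ (frame : String) (stride : Int) (i : Int) (length : Int), Dom_lookForStopToStart frame stride i length → Spec_lookForStopToStart frame stride i length (lookForStopToStart frame stride i length)

-- ===== LEMMAS AND PROOFS =====

-- a start codon window is never a stop codon window
lemma start_not_stop (w : String) (h : w ∈ startCodons) : w ∉ stopCodons := by
  simp [startCodons] at h
  subst h
  decide

-- the (found, x) update A performs at a start codon, ignoring length
def upd (frame : String) (stride i : Int) (st : Bool × String) (j : Int) : Bool × String :=
  if codonAt frame stride j ∈ startCodons then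
    (true, PySem.Str.slice frame (some i) (some (j + stride + 3)))
  else st

-- A's loop = fold of upd over the prefix before the break point
lemma aLoop_eq_foldl (frame : String) (stride i : Int) (js : List Int)
    (f : Bool) (x : String) (l : Int) :
    ((aLoop frame stride i js (f, x, l)).1, (aLoop frame stride i js (f, x, l)).2.1) =
      (js.takeWhile (fun j => decide (codonAt frame stride j ∈ startCodons) ||
        !decide (codonAt frame stride j ∈ stopCodons))).foldl (upd frame stride i) (f, x) := by
  induction js generalizing f x l with
  | nil => simp [aLoop]
  | cons j js ih =>
    by_cases hs : codonAt frame stride j ∈ startCodons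
    · simp [aLoop, hs, upd, ih]
    · by_cases ht : codonAt frame stride j ∈ stopCodons
      · simp [aLoop, hs, ht]
      · simp [aLoop, hs, ht, upd, ih]

-- the fold keeps the LAST start codon: it is find? on the reversed list
lemma foldl_upd_eq_find (frame : String) (stride i : Int) (l : List Int) (st : Bool × String) :
    l.foldl (upd frame stride i) st =
      match l.reverse.find? (fun j => decide (codonAt frame stride j ∈ startCodons)) with
      | some j => (true, PySem.Str.slice frame (some i) (some (j + stride + 3)))
      | none => st := by
  induction l generalizing st with
  | nil => simp
  | cons j js ih =>
    rw [List.foldl_cons, ih]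
    rw [List.reverse_cons, List.find?_append]
    by_cases hs : codonAt frame stride j ∈ startCodons
    · cases h : js.reverse.find? (fun j => decide (codonAt frame stride j ∈ startCodons)) <;>
        simp [hs, upd]
    · cases h : js.reverse.find? (fun j => decide (codonAt frame stride j ∈ startCodons)) <;>
        simp [hs, upd]

-- B's backward scan is the same find?
lemma bFindStart_eq_find (frame : String) (stride i : Int) (l : List Int) :
    bFindStart frame stride i l =
      match l.find? (fun j => decide (codonAt frame stride j ∈ startCodons)) with
      | some j => (true, PySem.Str.slice frame (some i) (some (j + stride + 3)))
      | none => (false, "") := by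
  induction l with
  | nil => simp [bFindStart]
  | cons j js ih =>
    by_cases hs : codonAt frame stride j ∈ startCodons
    · simp [bFindStart, hs]
    · simp [bFindStart, hs, ih]

-- B's first phase is find? with default
lemma bFindStop_eq_find (frame : String) (stride : Int) (l : List Int) (d : Int) :
    bFindStop frame stride l d =
      (l.find? (fun j => decide (codonAt frame stride j ∈ stopCodons))).getD d := by
  induction l with
  | nil => simp [bFindStop]
  | cons j js ih =>
    by_cases hs : codonAt frame stride j ∈ stopCodons
    · simp [bFindStop, hs]
    · simp [bFindStop, hs, ih]

-- the break-free prefix of range(a, b) is exactly range(a, ps) for ps = first stop (default b)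
lemma takeWhile_pyRange (frame : String) (stride : Int) (a b : Int) (hab : a ≤ b) :
    (PySem.List.pyRange a b 1).takeWhile (fun j => decide (codonAt frame stride j ∈ startCodons) ||
        !decide (codonAt frame stride j ∈ stopCodons)) =
      PySem.List.pyRange a
        (((PySem.List.pyRange a b 1).find? (fun j => decide (codonAt frame stride j ∈ stopCodons))).getD b) 1 := by
  induction hn : (b - a).toNat generalizing a with
  | zero =>
    have hba : b ≤ a := by omega
    rw [PySem.List.pyRange_one_eq_nil hba]
    simp [PySem.List.pyRange_one_eq_nil hba]
  | succ n ih =>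
    have hab' : a < b := by omega
    rw [PySem.List.pyRange_one_cons hab']
    by_cases ht : codonAt frame stride a ∈ stopCodons
    · have hs : codonAt frame stride a ∉ startCodons := by
        intro h; exact start_not_stop _ h ht
      simp [List.takeWhile_cons, hs, ht, PySem.List.pyRange_one_eq_nil (le_refl a)]
    · rw [List.takeWhile_cons]
      have hrec := ih (a + 1) (by omega) (by omega)
      simp only [ht, decide_false, Bool.not_false, Bool.or_true, List.find?_cons,
        decide_eq_true_eq, if_neg ht]
      rw [hrec]
      set m := (((PySem.List.pyRange (a+1) b 1).find? (fun j => decide (codonAt frame stride j ∈ stopCodons))).getD b) with hm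
      have ham : a < m := by
        rcases h : (PySem.List.pyRange (a+1) b 1).find? (fun j => decide (codonAt frame stride j ∈ stopCodons)) with _ | j
        · simp [hm, h]; omega
        · have := List.find?_some h
          have hmem := List.mem_of_find?_eq_some h
          rw [PySem.List.mem_pyRange_one] at hmem
          simp [hm, h]; omega
      rw [PySem.List.pyRange_one_cons ham]
      simp
  termination_by (b - a).toNat

-- main equivalence
lemma main_eq (frame : String) (stride i length : Int) :
    lookForStopToStart frame stride i length = lookForStopToStart_alt frame stride i length := by
  simp only [lookForStopToStart, lookForStopToStart_alt]
  set n := PySem.Str.len (PySem.Str.slice frame (some stride) none) with hn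
  have hn0 : 0 ≤ n := by
    rw [hn, PySem.Str.len_eq]
    exact_mod_cast Int.natCast_nonneg _
  rw [aLoop_eq_foldl, foldl_upd_eq_find, bFindStop_eq_find, bFindStart_eq_find,
    takeWhile_pyRange frame stride 0 n hn0]
  rw [show PySem.List.pyRange
      (((PySem.List.pyRange 0 n 1).find? (fun j => decide (codonAt frame stride j ∈ stopCodons))).getD n - 1)
      (-1) (-1) =
      (PySem.List.pyRange 0
        (((PySem.List.pyRange 0 n 1).find? (fun j => decide (codonAt frame stride j ∈ stopCodons))).getD n) 1).reverse
    from by rw [PySem.List.pyRange_neg_one_eq_reverse]; norm_num]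

-- ===== VERDICT (by name: the statement is the Claim_ definition above) =====
theorem lookForStopToStart_spec : Claim_equal_lookForStopToStart := by
  intro frame stride i length _
  unfold Spec_lookForStopToStart
  exact main_eq frame stride i length
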